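-- pv_equiv track=rewrite | github.com/thiagoenginner/previos_progra_1 | progra 1_ resolucion de examenes/sudoku/programa_2.py | contar_mayusculas
-- ===== SOURCE A (Python) =====
-- def contar_mayusculas(string):
--     if not string:
--         return 0
--     else:
--         if string[0].isupper():
--             return 1 + contar_mayusculas(string[1:])
--         else:
--             return contar_mayusculas(string[1:])
-- ===== SOURCE B (Python) =====
-- def contar_mayusculas(string):
--     count = 0
--     for c in string:
--         if c.isupper():
--             count += 1
--     return count
-- ===== Notes on version B (the rewrite author's own statement) =====
-- stated objective: idiomatic
-- what changed: Replaced head/tail recursion with string slicing by a single iterative loop with a running counter.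
import Mathlib
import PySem

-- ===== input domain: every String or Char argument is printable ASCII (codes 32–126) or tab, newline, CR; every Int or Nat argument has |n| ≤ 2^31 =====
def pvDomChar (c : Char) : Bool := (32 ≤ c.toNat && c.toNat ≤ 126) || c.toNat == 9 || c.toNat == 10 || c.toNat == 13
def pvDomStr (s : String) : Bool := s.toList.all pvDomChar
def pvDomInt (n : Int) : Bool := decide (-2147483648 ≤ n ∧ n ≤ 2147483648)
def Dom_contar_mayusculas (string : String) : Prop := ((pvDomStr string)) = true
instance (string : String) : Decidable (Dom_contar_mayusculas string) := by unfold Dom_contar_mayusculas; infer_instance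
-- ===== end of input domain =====

-- B replaces A's head/tail recursion (with slicing) by a single iterative counting loop.


-- ===== PORT A =====
-- A's recursion: empty → 0; else test string[0].isupper(), recurse on string[1:]
def contarRecA : List Char → Int
  | [] => 0
  | c :: rest =>
    if PySem.Chars.isupper c then 1 + contarRecA rest else contarRecA rest

def contar_mayusculas (string : String) : Int := contarRecA string.toList

-- ===== PORT B =====
-- B's loop: count = 0; for c in string: if c.isupper(): count += 1
def contar_mayusculas_alt (string : String) : Int :=
  string.toList.foldl (fun count c => if PySem.Chars.isupper c then count + 1 else count) 0

-- ===== PRECONDITION & SPEC =====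
def Spec_contar_mayusculas (string : String) (out : Int) : Prop := out = contar_mayusculas_alt string
instance (string : String) (out : Int) : Decidable (Spec_contar_mayusculas string out) := by unfold Spec_contar_mayusculas; infer_instance

-- ===== CLAIM (what is proved, stated in full; the proofs are below) =====
def Claim_equal_contar_mayusculas : Prop := ∀ (string : String), Dom_contar_mayusculas string → Spec_contar_mayusculas string (contar_mayusculas string)

-- ===== LEMMAS AND PROOFS =====
theorem foldl_count_eq (cs : List Char) (acc : Int) :
    cs.foldl (fun count c => if PySem.Chars.isupper c then count + 1 else count) acc
      = acc + contarRecA cs := by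
  induction cs generalizing acc with
  | nil => simp [contarRecA]
  | cons c rest ih =>
    simp only [List.foldl, contarRecA]
    split_ifs with h <;> rw [ih] <;> ring

-- ===== VERDICT (by name: the statement is the Claim_ definition above) =====
theorem contar_mayusculas_spec : Claim_equal_contar_mayusculas := by
  intro s _
  unfold Spec_contar_mayusculas contar_mayusculas contar_mayusculas_alt
  rw [foldl_count_eq]
  ring
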